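-- pv_equiv track=rewrite | github.com/scipion-chem/scipion-chem-Schrodinger | pwchemSchrodinger/utils/utils.py | maeLineSplit
-- ===== SOURCE A (Python) =====
-- def maeLineSplit(maeLine):
--     '''Some elements are strings surrounded by "" but with spaces in between,
--         accounting for several elements of the list when they are actually just 1'''
--     elements = []
--     stri, ele = False, ''
--     for a in maeLine.strip():
--         if stri:
--             ele += a
--             if a == '"':
--                 stri = False
--         else:
--             if a == ' ':
--                 elements.append(ele)
--                 ele = ''
--             else:
--                 ele += a
--                 if a == '"':
--                     stri = True
--     elements.append(ele)
--     return elements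
-- ===== SOURCE B (Python) =====
-- def maeLineSplit(maeLine):
--     '''Token-merge version: split on single spaces (keeping empties), then
--     merge tokens whose preceding space lies inside a quoted string, tracked
--     by the running parity of '"' characters.'''
--     parts = maeLine.strip().split(' ')
--     elements = []
--     cur = parts[0]
--     inString = parts[0].count('"') % 2 == 1
--     for tok in parts[1:]:
--         if inString:
--             cur += ' ' + tok
--         else:
--             elements.append(cur)
--             cur = tok
--         if tok.count('"') % 2 == 1:
--             inString = not inString
--     elements.append(cur)
--     return elements
-- ===== Notes on version B (the rewrite author's own statement) =====
-- stated objective: faster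
-- what changed: Replaces A's character-by-character state machine by first splitting the stripped line on single spaces (keeping empties) and then merging tokens in one fold driven by the running parity of double quotes, moving the per-character work into str.split/str.count.
import Mathlib
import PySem

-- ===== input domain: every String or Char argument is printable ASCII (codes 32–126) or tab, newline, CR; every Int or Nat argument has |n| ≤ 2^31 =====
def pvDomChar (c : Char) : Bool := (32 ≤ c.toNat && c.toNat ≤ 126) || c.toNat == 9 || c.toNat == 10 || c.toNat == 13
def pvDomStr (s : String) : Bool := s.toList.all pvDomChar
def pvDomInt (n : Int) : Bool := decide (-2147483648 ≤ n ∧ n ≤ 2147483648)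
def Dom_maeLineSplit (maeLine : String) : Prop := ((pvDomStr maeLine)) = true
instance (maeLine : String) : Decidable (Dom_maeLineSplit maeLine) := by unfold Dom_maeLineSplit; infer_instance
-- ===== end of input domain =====

-- B replaces A's character-by-character scan by a split-on-space pass followed by a
-- token-merging fold driven by quote parity (objective: alternative decomposition).

-- ===== PORT A =====
-- A's loop body: state (elements, stri, ele); ele += a is ele ++ [a] over chars.
def maeStepA (st : List (List Char) × Bool × List Char) (a : Char) :
    List (List Char) × Bool × List Char :=
  let (elements, stri, ele) := st
  if stri then
    (elements, if a = '"' then false else true, ele ++ [a])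
  else
    if a = ' ' then
      (elements ++ [ele], stri, [])
    else
      (elements, if a = '"' then true else stri, ele ++ [a])

def maeLineSplit (maeLine : String) : List String :=
  let st := ((PySem.Str.strip maeLine).toList.foldl maeStepA ([], false, []))
  (st.1 ++ [st.2.2]).map String.ofList

-- ===== PORT B =====
-- tok.count('"') % 2 == 1 : counting one single character is exactly List.count.
def pvQuoteOdd (t : List Char) : Bool := t.count '"' % 2 == 1

-- B's loop body: state (elements, cur, inString).
def maeStepB (st : List (List Char) × List Char × Bool) (tok : List Char) :
    List (List Char) × List Char × Bool :=
  let (elements, cur, inString) := st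
  let (elements', cur') :=
    if inString then (elements, cur ++ ' ' :: tok) else (elements ++ [cur], tok)
  (elements', cur', if pvQuoteOdd tok then !inString else inString)

-- maeLine.strip().split(' '): a one-character separator split keeping empty pieces
-- is exactly List.splitOn ' ' on the stripped characters (exact for sep = ' ').
def maeLineSplit_alt (maeLine : String) : List String :=
  match List.splitOn ' ' (PySem.Str.strip maeLine).toList with
  | [] => []  -- unreachable: split never returns an empty list (totality guard only)
  | p0 :: rest =>
    let st := rest.foldl maeStepB ([], p0, pvQuoteOdd p0)
    (st.1 ++ [st.2.1]).map String.ofList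

-- ===== PRECONDITION & SPEC =====
def Spec_maeLineSplit (maeLine : String) (out : List String) : Prop := out = maeLineSplit_alt maeLine
instance (maeLine : String) (out : List String) : Decidable (Spec_maeLineSplit maeLine out) := by unfold Spec_maeLineSplit; infer_instance

-- ===== CLAIM (what is proved, stated in full; the proofs are below) =====
def Claim_equal_maeLineSplit : Prop := ∀ (maeLine : String), Dom_maeLineSplit maeLine → Spec_maeLineSplit maeLine (maeLineSplit maeLine)

-- ===== LEMMAS AND PROOFS =====

-- Common semantic characterisation: g p cs = (head, tail) such that the produced
-- element list is (head consed onto tail), scanning cs from quote-parity p.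
def pvG (p : Bool) (cs : List Char) : List Char × List (List Char) :=
  match cs with
  | [] => ([], [])
  | c :: cs =>
    if p = false ∧ c = ' ' then
      ([], (pvG false cs).1 :: (pvG false cs).2)
    else
      let p' := if c = '"' then !p else p
      (c :: (pvG p' cs).1, (pvG p' cs).2)

-- A's fold computes pvG.
theorem pvA_g (cs : List Char) : ∀ (elements : List (List Char)) (stri : Bool) (ele : List Char),
    (let st := cs.foldl maeStepA (elements, stri, ele)
     st.1 ++ [st.2.2]) =
      elements ++ (ele ++ (pvG stri cs).1) :: (pvG stri cs).2 := by
  induction cs with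
  | nil => intro elements stri ele; simp [pvG]
  | cons c cs ih =>
    intro elements stri ele
    by_cases hs : stri
    · subst hs
      have hne : ¬ ((true : Bool) = false ∧ c = ' ') := by simp
      by_cases hq : c = '"' <;>
        simp [List.foldl_cons, maeStepA, pvG, hq, ih]
    · have hs' : stri = false := by simpa using hs
      subst hs'
      by_cases hsp : c = ' '
      · simp [List.foldl_cons, maeStepA, pvG, hsp, ih]
      · by_cases hq : c = '"' <;>
          simp [List.foldl_cons, maeStepA, pvG, hq, hsp, ih]

-- Token-level continuation: given current parity p and remaining tokens,
-- (suffix appended to the current element, further elements).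
def pvM (p : Bool) (ts : List (List Char)) : List Char × List (List Char) :=
  match ts with
  | [] => ([], [])
  | t :: ts =>
    let p' := if pvQuoteOdd t then !p else p
    if p then (' ' :: t ++ (pvM p' ts).1, (pvM p' ts).2)
    else ([], (t ++ (pvM p' ts).1) :: (pvM p' ts).2)

-- B's fold computes pvM.
theorem pvB_m (ts : List (List Char)) : ∀ (elements : List (List Char)) (cur : List Char) (p : Bool),
    (let st := ts.foldl maeStepB (elements, cur, p)
     st.1 ++ [st.2.1]) =
      elements ++ (cur ++ (pvM p ts).1) :: (pvM p ts).2 := by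
  induction ts with
  | nil => intro elements cur p; simp [pvM]
  | cons t ts ih =>
    intro elements cur p
    by_cases hp : p <;>
      by_cases hq : pvQuoteOdd t <;>
        simp [List.foldl_cons, maeStepB, pvM, hp, hq, ih]

theorem pvQuoteOdd_cons (c : Char) (t : List Char) :
    pvQuoteOdd (c :: t) = if c = '"' then !(pvQuoteOdd t) else pvQuoteOdd t := by
  have key : ∀ n : Nat, ((n + 1) % 2 == 1) = !(n % 2 == 1) := by
    intro n
    apply Bool.eq_iff_iff.mpr
    simp only [beq_iff_eq, Bool.not_eq_true', beq_eq_false_iff_ne, ne_eq]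
    omega
  rcases eq_or_ne c '"' with hq | hq
  · subst hq
    simp [pvQuoteOdd, key]
  · simp [pvQuoteOdd, hq]

-- pvG agrees with pvM over the space-split tokens.
theorem pvG_m (cs : List Char) : ∀ (p : Bool),
    pvG p cs =
      match List.splitOn ' ' cs with
      | [] => ([], [])
      | t0 :: ts =>
        (t0 ++ (pvM (if pvQuoteOdd t0 then !p else p) ts).1,
         (pvM (if pvQuoteOdd t0 then !p else p) ts).2) := by
  induction cs with
  | nil => intro p; simp [pvG, List.splitOn, List.splitOnP_nil, pvM]
  | cons c cs ih =>
    intro p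
    obtain ⟨t0, ts, hsplit⟩ :
        ∃ t0 ts, List.splitOn ' ' cs = t0 :: ts := by
      rcases h : List.splitOn ' ' cs with _ | ⟨t0, ts⟩
      · exact absurd h (List.splitOnP_ne_nil _ _)
      · exact ⟨t0, ts, rfl⟩
    by_cases hsp : c = ' '
    · subst hsp
      have hnext : List.splitOn ' ' (' ' :: cs) = [] :: List.splitOn ' ' cs := by
        simp [List.splitOn, List.splitOnP_cons]
      by_cases hp : p
      · -- inside string: space is an ordinary char
        have hg : pvG p (' ' :: cs) = (' ' :: (pvG p cs).1, (pvG p cs).2) := by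
          simp [pvG, hp]
        simp only [hnext, hg, ih p, hsplit]
        simp [pvM, pvQuoteOdd, hp]
      · have hp' : p = false := by simpa using hp
        subst hp'
        simp only [pvG, hnext, hsplit]
        simp only [ih false, hsplit]
        simp [pvM, pvQuoteOdd]
    · have hsplit' : List.splitOnP (fun x => x == ' ') cs = t0 :: ts := by
        simpa [List.splitOn] using hsplit
      have hnext : List.splitOn ' ' (c :: cs) = (c :: t0) :: ts := by
        simp [List.splitOn, List.splitOnP_cons, hsp, hsplit']
      have hg : pvG p (c :: cs) =
          (c :: (pvG (if c = '"' then !p else p) cs).1,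
           (pvG (if c = '"' then !p else p) cs).2) := by
        simp [pvG, hsp]
      have hpar : (if pvQuoteOdd (c :: t0) then !p else p) =
          (if pvQuoteOdd t0 then !(if c = '"' then !p else p) else (if c = '"' then !p else p)) := by
        rw [pvQuoteOdd_cons]
        by_cases hq : c = '"' <;> by_cases h0 : pvQuoteOdd t0 <;> simp [hq, h0]
      simp only [hg, ih (if c = '"' then !p else p), hsplit, hnext, hpar]
      simp

-- ===== VERDICT (by name: the statement is the Claim_ definition above) =====
theorem maeLineSplit_spec : Claim_equal_maeLineSplit := by
  intro maeLine _
  unfold Spec_maeLineSplit maeLineSplit maeLineSplit_alt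
  obtain ⟨t0, ts, hsplit⟩ :
      ∃ t0 ts, List.splitOn ' ' (PySem.Str.strip maeLine).toList = t0 :: ts := by
    rcases h : List.splitOn ' ' (PySem.Str.strip maeLine).toList with _ | ⟨t0, ts⟩
    · exact absurd h (List.splitOnP_ne_nil _ _)
    · exact ⟨t0, ts, rfl⟩
  simp only [hsplit, pvA_g, pvB_m, List.nil_append]
  have := pvG_m (PySem.Str.strip maeLine).toList false
  rw [hsplit] at this
  simp only [this]
  simp
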